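-- pv_equiv track=rewrite | github.com/infinity390/chemistryai | chemistryai/iupac_namer.py | enumerate_cycle_numberings
-- ===== SOURCE A (Python) =====
-- def enumerate_cycle_numberings(cycle, start_atom=None):
--     """
--     Return all possible numberings of a cycle.
--     Each numbering is a list of atom IDs.
--     Includes both directions.
--     If start_atom is given, numbering starts only from that atom.
--     """
--     L = len(cycle)
--     numberings = []
--
--     if start_atom is None:
--         starts = range(L)
--     else:
--         if start_atom not in cycle:
--             raise ValueError("start_atom not in cycle")
--         starts = [cycle.index(start_atom)]
--
--     for start in starts:
--         # clockwise
--         numberings.append([cycle[(start + i) % L] for i in range(L)])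
--         # anticlockwise
--         numberings.append([cycle[(start - i) % L] for i in range(L)])
--
--     return numberings
-- ===== SOURCE B (Python) =====
-- def enumerate_cycle_numberings(cycle, start_atom=None):
--     # Stage 1: build all rotations incrementally (no modular indexing).
--     rotations = []
--     rot = list(cycle)
--     for _ in range(len(cycle)):
--         rotations.append(rot)
--         rot = rot[1:] + rot[:1]
--     # Stage 2: select rotations (first one headed by start_atom, if given).
--     if start_atom is not None:
--         rotations = [r for r in rotations if r[0] == start_atom][:1]
--         if not rotations:
--             raise ValueError("start_atom not in cycle")
--     # Stage 3: emit each rotation followed by its anticlockwise companion.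
--     out = []
--     for r in rotations:
--         out.append(r)
--         out.append(r[:1] + r[1:][::-1])
--     return out
-- ===== Notes on version B (the rewrite author's own statement) =====
-- stated objective: alternative
-- what changed: B never indexes the cycle: it builds all rotations incrementally (each from the previous by rot[1:]+rot[:1]) in one pass, selects the first rotation headed by start_atom instead of calling cycle.index, and emits each rotation with its reversed-tail companion in a separate pass.
import Mathlib
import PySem

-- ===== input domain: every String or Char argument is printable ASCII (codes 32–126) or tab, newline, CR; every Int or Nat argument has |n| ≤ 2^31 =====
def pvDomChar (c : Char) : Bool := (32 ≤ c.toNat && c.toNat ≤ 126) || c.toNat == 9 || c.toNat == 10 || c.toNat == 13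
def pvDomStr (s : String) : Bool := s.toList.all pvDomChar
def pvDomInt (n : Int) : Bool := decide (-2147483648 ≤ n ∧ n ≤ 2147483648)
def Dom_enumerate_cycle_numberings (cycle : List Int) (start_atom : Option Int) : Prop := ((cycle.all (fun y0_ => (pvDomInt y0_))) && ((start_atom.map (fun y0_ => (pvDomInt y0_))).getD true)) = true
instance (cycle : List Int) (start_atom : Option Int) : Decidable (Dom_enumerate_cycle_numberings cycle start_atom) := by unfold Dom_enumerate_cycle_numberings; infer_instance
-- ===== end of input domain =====

-- B builds all rotations incrementally (rot = rot[1:]+rot[:1]) and selects/flattens them in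
-- separate passes, instead of A's per-start modular-index comprehensions; same cost, no speed claim.

-- ===== PORT A =====
def enumerate_cycle_numberings (cycle : List Int) (start_atom : Option Int) : List (List Int) :=
  let L : Int := cycle.length
  let starts : List Int :=
    match start_atom with
    | none => PySem.List.pyRange 0 L 1
    | some a => [(((PySem.List.index? cycle a).map (fun k => (k : Int))).getD 0)]
  starts.foldl (fun numberings start =>
    numberings
      ++ [(PySem.List.pyRange 0 L 1).map
            (fun i => PySem.List.pyGetD cycle (PySem.Int.mod (start + i) L) 0)]
      ++ [(PySem.List.pyRange 0 L 1).map
            (fun i => PySem.List.pyGetD cycle (PySem.Int.mod (start - i) L) 0)]) []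

-- ===== PORT B =====
-- the 'for _ in range(len(cycle)): rotations.append(rot); rot = rot[1:] + rot[:1]' loop of Source B
def pvRotations : Nat → List Int → List (List Int)
  | 0, _ => []
  | Nat.succ n, rot =>
      rot :: pvRotations n (PySem.List.slice rot (some 1) none ++ PySem.List.slice rot none (some 1))

def enumerate_cycle_numberings_alt (cycle : List Int) (start_atom : Option Int) : List (List Int) :=
  let rotations := pvRotations cycle.length cycle
  let rotations :=
    match start_atom with
    | none => rotations
    | some a => (rotations.filter (fun r => PySem.List.pyGetD r 0 0 == a)).take 1
  rotations.foldl (fun out r =>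
    out ++ [r]
        ++ [PySem.List.slice r none (some 1) ++ (PySem.List.slice r (some 1) none).reverse]) []

-- ===== PRECONDITION & SPEC =====
-- Pre_ excludes exactly the inputs on which A raises ValueError: a start_atom not in cycle.
def Pre_enumerate_cycle_numberings (cycle : List Int) (start_atom : Option Int) : Prop :=
  (start_atom.elim true (fun a => cycle.contains a)) = true
instance (cycle : List Int) (start_atom : Option Int) : Decidable (Pre_enumerate_cycle_numberings cycle start_atom) := by unfold Pre_enumerate_cycle_numberings; infer_instance
def pvWitness_enumerate_cycle_numberings : List Int × Option Int := ([1, 2, 3], some 2)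

def Spec_enumerate_cycle_numberings (cycle : List Int) (start_atom : Option Int) (out : List (List Int)) : Prop := out = enumerate_cycle_numberings_alt cycle start_atom
instance (cycle : List Int) (start_atom : Option Int) (out : List (List Int)) : Decidable (Spec_enumerate_cycle_numberings cycle start_atom out) := by unfold Spec_enumerate_cycle_numberings; infer_instance

-- ===== CLAIM (what is proved, stated in full; the proofs are below) =====
def Claim_equal_enumerate_cycle_numberings : Prop := ∀ (cycle : List Int) (start_atom : Option Int), Dom_enumerate_cycle_numberings cycle start_atom → Pre_enumerate_cycle_numberings cycle start_atom → Spec_enumerate_cycle_numberings cycle start_atom (enumerate_cycle_numberings cycle start_atom)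

-- ===== LEMMAS AND PROOFS =====

-- A's clockwise comprehension at start t is the rotation drop t ++ take t.
theorem pv_cwA (cycle : List Int) (t : Nat) (ht : t < cycle.length) :
    (PySem.List.pyRange 0 (cycle.length : Int) 1).map
      (fun i => PySem.List.pyGetD cycle (PySem.Int.mod ((t : Int) + i) (cycle.length : Int)) 0)
    = cycle.drop t ++ cycle.take t := by
  apply List.ext_getElem
  · simp [PySem.List.length_pyRange_one]; omega
  · intro k h1 h2
    have hk : k < cycle.length := by
      simpa [PySem.List.length_pyRange_one] using h1
    have hn : (0:Int) < (cycle.length : Int) := by omega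
    simp only [List.getElem_map, PySem.List.getElem_pyRange_one]
    rw [PySem.Int.mod_eq_emod_of_pos hn]
    have hcast : ((t:Int) + (0 + (k:Int))) % (cycle.length:Int) = (((t + k) % cycle.length : Nat) : Int) := by
      push_cast; ring_nf
    rw [hcast, PySem.List.pyGetD_natCast]
    rw [List.getElem_append]
    split_ifs with hlt
    · have hsm : (t + k) % cycle.length = t + k := Nat.mod_eq_of_lt (by simp at hlt; omega)
      rw [hsm, List.getElem_drop]
      simp [List.getD_eq_getElem?_getD, (by simp at hlt; omega : t + k < cycle.length)]
    · have hge : cycle.length ≤ t + k := by simp at hlt; omega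
      have hsm : (t + k) % cycle.length = t + k - cycle.length := by
        rw [Nat.mod_eq_sub_mod hge]; exact Nat.mod_eq_of_lt (by omega)
      rw [hsm, List.getElem_take]
      simp [List.getD_eq_getElem?_getD, (by omega : t + k - cycle.length < cycle.length)]
      congr 1
      omega

-- Element j of the rotation drop t ++ take t is cycle[(t+j) % len].
theorem pv_rot_elem (cycle : List Int) (t j : Nat) (ht : t < cycle.length) (hj : j < cycle.length) :
    (cycle.drop t ++ cycle.take t)[j]'(by simp; omega)
      = cycle[(t + j) % cycle.length]'(Nat.mod_lt _ (by omega)) := by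
  rcases Nat.lt_or_ge j (cycle.length - t) with h | h
  · rw [List.getElem_append_left (by simp; omega)]
    rw [List.getElem_drop]
    congr 1
    exact (Nat.mod_eq_of_lt (by omega)).symm
  · rw [List.getElem_append_right (by simp; omega)]
    rw [List.getElem_take]
    congr 1
    have : (t + j) % cycle.length = t + j - cycle.length := by
      rw [Nat.mod_eq_sub_mod (by omega)]; exact Nat.mod_eq_of_lt (by omega)
    simp [this]
    omega

-- A's anticlockwise comprehension at start t is the rotation's head followed by its reversed tail.
theorem pv_ccwA (cycle : List Int) (t : Nat) (ht : t < cycle.length) :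
    (PySem.List.pyRange 0 (cycle.length : Int) 1).map
      (fun i => PySem.List.pyGetD cycle (PySem.Int.mod ((t : Int) - i) (cycle.length : Int)) 0)
    = (cycle.drop t ++ cycle.take t).take 1 ++ ((cycle.drop t ++ cycle.take t).drop 1).reverse := by
  have hrl : (cycle.drop t ++ cycle.take t).length = cycle.length := by simp; omega
  apply List.ext_getElem
  · simp [PySem.List.length_pyRange_one]; omega
  · intro k h1 h2
    have hk : k < cycle.length := by simpa [PySem.List.length_pyRange_one] using h1
    have hn : (0:Int) < (cycle.length : Int) := by omega
    simp only [List.getElem_map, PySem.List.getElem_pyRange_one]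
    rw [PySem.Int.mod_eq_emod_of_pos hn]
    have hstep : ((t:Int) - (0 + (k:Int))) % (cycle.length:Int)
        = (((t + (cycle.length - k)) % cycle.length : Nat) : Int) := by
      have h0 : ((t:Int) - (0 + (k:Int))) % (cycle.length:Int)
          = (((t + (cycle.length - k) : Nat) : Int) - (cycle.length:Int)) % (cycle.length:Int) := by
        congr 1; push_cast; omega
      rw [h0, Int.sub_emod_right, ← Int.natCast_mod]
    rw [hstep, PySem.List.pyGetD_natCast]
    have hmem : (t + (cycle.length - k)) % cycle.length < cycle.length := Nat.mod_lt _ (by omega)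
    rw [List.getD_eq_getElem _ _ hmem]
    rcases Nat.eq_zero_or_pos k with hk0 | hk1
    · subst hk0
      rw [List.getElem_append_left (by simp [hrl]; omega)]
      rw [List.getElem_take]
      rw [pv_rot_elem cycle t 0 ht (by omega)]
      congr 1
      rw [Nat.sub_zero, Nat.add_mod_right]
      simp
    · rw [List.getElem_append_right (by simp [hrl]; omega)]
      rw [List.getElem_reverse, List.getElem_drop]
      rw [pv_rot_elem cycle t _ ht (by simp [hrl]; omega)]
      congr 1
      have hlen1 : (List.take 1 (cycle.drop t ++ cycle.take t)).length = 1 := by simp [hrl]; omega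
      have hlen2 : (List.drop 1 (cycle.drop t ++ cycle.take t)).length = cycle.length - 1 := by simp [hrl]
      rw [hlen1, hlen2]
      have e1 : t + (1 + (cycle.length - 1 - 1 - (k - 1))) = t + (cycle.length - k) := by omega
      rw [e1]

-- One rotation step sends the rotation at t to the rotation at t+1.
theorem pv_rot_succ (cycle : List Int) (t : Nat) (ht : t < cycle.length) :
    (cycle.drop t ++ cycle.take t).drop 1 ++ (cycle.drop t ++ cycle.take t).take 1
      = cycle.drop (t + 1) ++ cycle.take (t + 1) := by
  have hdrop : cycle.drop t = cycle[t] :: cycle.drop (t + 1) := List.drop_eq_getElem_cons ht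
  rw [hdrop]
  simp only [List.cons_append, List.drop_succ_cons, List.drop_zero, List.take_succ_cons,
    List.take_zero]
  rw [List.append_assoc]
  congr 1
  rw [List.take_add_one, List.getElem?_eq_getElem ht]
  rfl

-- The incremental rotation loop produces exactly the rotations drop t ++ take t.
theorem pv_rotations_eq (cycle : List Int) :
    ∀ n t, t + n ≤ cycle.length →
      pvRotations n (cycle.drop t ++ cycle.take t)
        = (List.range n).map (fun j => cycle.drop (t + j) ++ cycle.take (t + j)) := by
  intro n
  induction n with
  | zero => intro t _; simp [pvRotations]
  | succ n ih =>
      intro t hle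
      have ht : t < cycle.length := by omega
      have h1 : PySem.List.slice (cycle.drop t ++ cycle.take t) (some 1) none
          = (cycle.drop t ++ cycle.take t).drop 1 := by
        rw [PySem.List.slice_from_one, List.drop_one]
      have h2 : PySem.List.slice (cycle.drop t ++ cycle.take t) none (some 1)
          = (cycle.drop t ++ cycle.take t).take 1 := by
        norm_num [PySem.List.slice_to]
      simp only [pvRotations, h1, h2]
      rw [pv_rot_succ cycle t ht, ih (t + 1) (by omega)]
      simp only [List.range_succ_eq_map, List.map_cons, List.map_map]
      refine List.cons_eq_cons.mpr ⟨by simp, ?_⟩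
      apply List.map_congr_left
      intro j _
      simp only [Function.comp]
      have : t + (j + 1) = t + 1 + j := by omega
      rw [this]

theorem pv_rotations_all (cycle : List Int) :
    pvRotations cycle.length cycle
      = (List.range cycle.length).map (fun j => cycle.drop j ++ cycle.take j) := by
  have h := pv_rotations_eq cycle cycle.length 0 (by omega)
  simpa using h

-- foldl with pointwise-equal step functions (equal on members) coincide.
theorem pv_foldl_congr {α β : Type} (xs : List α) (f g : β → α → β) (init : β)
    (h : ∀ b a, a ∈ xs → f b a = g b a) : xs.foldl f init = xs.foldl g init := by
  induction xs generalizing init with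
  | nil => rfl
  | cons x xs ih =>
      simp only [List.foldl_cons]
      rw [h init x (by simp)]
      exact ih _ (fun b a ha => h b a (by simp [ha]))

-- One loop iteration of A equals B's emission step on the corresponding rotation.
theorem pv_step (cycle : List Int) (t : Nat) (ht : t < cycle.length) (acc : List (List Int)) :
    acc
      ++ [(PySem.List.pyRange 0 (cycle.length : Int) 1).map
            (fun i => PySem.List.pyGetD cycle (PySem.Int.mod ((t : Int) + i) (cycle.length : Int)) 0)]
      ++ [(PySem.List.pyRange 0 (cycle.length : Int) 1).map
            (fun i => PySem.List.pyGetD cycle (PySem.Int.mod ((t : Int) - i) (cycle.length : Int)) 0)]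
    = acc ++ [cycle.drop t ++ cycle.take t]
          ++ [PySem.List.slice (cycle.drop t ++ cycle.take t) none (some 1)
              ++ (PySem.List.slice (cycle.drop t ++ cycle.take t) (some 1) none).reverse] := by
  rw [pv_cwA cycle t ht, pv_ccwA cycle t ht]
  norm_num [PySem.List.slice_to, PySem.List.slice_from]

-- First-match characterisation: filter-then-take-1 is find?.
theorem pv_filter_take_one {α : Type} (p : α → Bool) (xs : List α) :
    (xs.filter p).take 1 = (xs.find? p).elim [] (fun r => [r]) := by
  induction xs with
  | nil => rfl
  | cons x xs ih =>
      by_cases h : p x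
      · simp [h]
      · simp [h, ih]

-- find? returns the element at the first satisfying index.
theorem pv_find_first {α : Type} (p : α → Bool) :
    ∀ (xs : List α) (k : Nat) (hk : k < xs.length),
      p (xs[k]'hk) = true → (∀ j (hj : j < k), p (xs[j]'(by omega)) = false) →
        xs.find? p = some (xs[k]'hk) := by
  intro xs
  induction xs with
  | nil => intro k hk; simp at hk
  | cons x xs ih =>
      intro k hk hpk hmin
      cases k with
      | zero => simp_all
      | succ k =>
          have hx : p x = false := hmin 0 (by omega)
          simp only [List.find?_cons, hx]
          exact ih k (by simpa using hk) (by simpa using hpk)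
            (fun j hj => by simpa using hmin (j + 1) (by omega))

-- Head (r[0]) of the rotation at t is cycle[t].
theorem pv_rot_head (cycle : List Int) (t : Nat) (ht : t < cycle.length) :
    PySem.List.pyGetD (cycle.drop t ++ cycle.take t) 0 0 = cycle[t]'ht := by
  have h0 : ((0:Int)) = ((0:Nat):Int) := rfl
  rw [h0, PySem.List.pyGetD_natCast]
  have hlen : 0 < (cycle.drop t ++ cycle.take t).length := by simp; omega
  rw [List.getD_eq_getElem _ _ hlen]
  rw [List.getElem_append_left (by simp; omega)]
  rw [List.getElem_drop]
  simp

-- ===== VERDICT (by name: the statement is the Claim_ definition above) =====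
theorem enumerate_cycle_numberings_spec : Claim_equal_enumerate_cycle_numberings := by
  intro cycle start_atom _ hpre
  unfold Spec_enumerate_cycle_numberings
  unfold enumerate_cycle_numberings enumerate_cycle_numberings_alt
  cases start_atom with
  | none =>
      dsimp only
      rw [pv_rotations_all]
      have hB : (List.range cycle.length).map (fun j => cycle.drop j ++ cycle.take j)
          = (PySem.List.pyRange 0 (cycle.length : Int) 1).map
              (fun s => cycle.drop s.toNat ++ cycle.take s.toNat) := by
        rw [PySem.List.pyRange_one]
        simp [List.map_map, Function.comp]
      rw [hB, List.foldl_map]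
      apply pv_foldl_congr
      intro acc s hmem
      obtain ⟨hs0, hsL⟩ := (PySem.List.mem_pyRange_one).mp hmem
      have hcast : ((s.toNat : Int)) = s := Int.toNat_of_nonneg hs0
      have hstep := pv_step cycle s.toNat (by omega) acc
      rw [hcast] at hstep
      exact hstep
  | some a =>
      dsimp only
      rw [pv_rotations_all, pv_filter_take_one]
      have hmem : a ∈ cycle := by simpa [Pre_enumerate_cycle_numberings] using hpre
      obtain ⟨k, hk⟩ := Option.isSome_iff_exists.mp ((PySem.List.index?_isSome_iff cycle a).mpr hmem)
      obtain ⟨hklt, hkeq, hkmin⟩ := PySem.List.getElem_of_index?_eq_some hk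
      have hlen : k < ((List.range cycle.length).map
          (fun j => cycle.drop j ++ cycle.take j)).length := by simpa using hklt
      have hfind := pv_find_first (fun r => PySem.List.pyGetD r 0 0 == a)
        ((List.range cycle.length).map (fun j => cycle.drop j ++ cycle.take j)) k hlen
        (by
          simp only [List.getElem_map, List.getElem_range]
          rw [pv_rot_head cycle k hklt]
          simpa using hkeq)
        (fun j hj => by
          simp only [List.getElem_map, List.getElem_range]
          rw [pv_rot_head cycle j (by omega)]
          simpa using hkmin j (by omega))
      rw [List.getElem_map, List.getElem_range] at hfind
      rw [hfind]
      simp only [hk, Option.elim]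
      simp only [List.foldl_cons, List.foldl_nil]
      simpa using pv_step cycle k hklt []
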